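-- pv_equiv track=rewrite | github.com/jenny-jione/baekjoon | 17140.py | count
-- ===== SOURCE A (Python) =====
-- def count(arr):
--     count_dict = {}
--     for i in range(len(arr)):
--         num = arr[i]
--         if num == 0:
--             continue
--         count_dict.setdefault(num, 0)
--         count_dict[num] += 1
--     res = sorted(count_dict.items(), key=lambda x:(x[1], x[0]))
--     result = []
--     for i in range(len(res)):
--         result.append(res[i][0])
--         result.append(res[i][1])
--     return result
-- ===== SOURCE B (Python) =====
-- def _runs(vals):
--     # run-length encode a sorted list: [(value, run length), ...]
--     pairs = []
--     i = 0
--     n = len(vals)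
--     while i < n:
--         v = vals[i]
--         j = i + 1
--         while j < n and vals[j] == v:
--             j += 1
--         pairs.append((v, j - i))
--         i = j
--     return pairs
--
--
-- def count(arr):
--     vals = sorted(v for v in arr if v != 0)
--     pairs = sorted(_runs(vals), key=lambda p: (p[1], p[0]))
--     out = []
--     for v, c in pairs:
--         out.append(v)
--         out.append(c)
--     return out
-- ===== Notes on version B (the rewrite author's own statement) =====
-- stated objective: alternative
-- what changed: Counts are derived by filtering the nonzero values, sorting them and run-length encoding the sorted runs, instead of accumulating occurrence counts in a dict; the (count,value) sort and flattening stay.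
import Mathlib
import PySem

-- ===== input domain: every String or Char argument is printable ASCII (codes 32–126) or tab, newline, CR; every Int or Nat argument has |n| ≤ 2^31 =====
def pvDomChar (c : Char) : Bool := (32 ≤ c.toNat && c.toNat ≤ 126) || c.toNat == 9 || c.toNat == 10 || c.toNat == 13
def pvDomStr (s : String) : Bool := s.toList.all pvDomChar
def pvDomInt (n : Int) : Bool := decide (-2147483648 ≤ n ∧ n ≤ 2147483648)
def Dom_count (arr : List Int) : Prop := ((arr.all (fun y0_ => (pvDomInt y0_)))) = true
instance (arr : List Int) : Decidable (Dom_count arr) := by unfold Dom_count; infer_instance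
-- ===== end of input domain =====

-- B derives the counts by sorting the nonzero values and run-length encoding the sorted runs, instead of A's dict accumulation; same (count,value)-sorted flattened output (alternative decomposition, no speed claim).

-- ===== PORT A =====
def count (arr : List Int) : List Int :=
  -- `for i in range(len(arr)): num = arr[i]; …` reads the elements in order: a fold over arr
  let count_dict := arr.foldl (fun d num =>
      if num == 0 then d
      else
        -- count_dict.setdefault(num, 0); count_dict[num] += 1  (key present after setdefault)
        let d := PySem.Dict.setdefault d num (0 : Int)
        d.insert num (d.getD num 0 + 1)) PySem.Dict.empty
  let res := PySem.List.sorted2 count_dict.items (fun x => x.2) (fun x => x.1)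
  -- `for i in range(len(res)): result.append(res[i][0]); result.append(res[i][1])`
  res.foldl (fun result p => (result ++ [p.1]) ++ [p.2]) []

-- ===== PORT B =====
-- Source B's _runs: the outer while-loop consumes one run per iteration (head value v, run length
-- j - i = 1 + leading equal elements after the head), recursing on the remaining suffix
def pvRuns (vals : List Int) : List (Int × Int) :=
  match vals with
  | [] => []
  | v :: t =>
      let k : Int := 1 + (t.takeWhile (fun x => x == v)).length
      (v, k) :: pvRuns (t.dropWhile (fun x => x == v))
termination_by vals.length
decreasing_by
  simp only [List.length_cons]
  exact Nat.lt_succ_of_le (List.length_dropWhile_le _ _)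

def count_alt (arr : List Int) : List Int :=
  let vals := PySem.List.sorted (arr.filter (fun v => !(v == 0))) (fun x => x)
  let pairs := PySem.List.sorted2 (pvRuns vals) (fun p => p.2) (fun p => p.1)
  pairs.foldl (fun out p => out ++ [p.1, p.2]) []

-- ===== PRECONDITION & SPEC =====
def Spec_count (arr : List Int) (out : List Int) : Prop := out = count_alt arr
instance (arr : List Int) (out : List Int) : Decidable (Spec_count arr out) := by unfold Spec_count; infer_instance

-- ===== CLAIM (what is proved, stated in full; the proofs are below) =====
def Claim_equal_count : Prop := ∀ (arr : List Int), Dom_count arr → Spec_count arr (count arr)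

-- ===== LEMMAS AND PROOFS =====

-- the Python tuple key (x[1], x[0]) compared lexicographically, as one Lex key
lemma lex_key_eq (a b : Int × Int) :
    (decide (a.2 < b.2) || (!decide (b.2 < a.2) && decide (a.1 < b.1)))
      = decide (toLex (a.2, a.1) < toLex (b.2, b.1)) := by
  rcases lt_trichotomy a.2 b.2 with h|h|h <;>
    simp [Prod.Lex.lt_iff, h, not_lt_of_gt]

lemma sorted2_eq_sorted_lex (l : List (Int × Int)) :
    PySem.List.sorted2 l (fun p => p.2) (fun p => p.1)
      = PySem.List.sorted l (fun p => toLex (p.2, p.1)) := by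
  unfold PySem.List.sorted2 PySem.List.sorted
  have h : (fun a b : Int × Int =>
      decide (a.2 < b.2) || (!decide (b.2 < a.2) && decide (a.1 < b.1)))
      = (fun a b : Int × Int => decide (toLex (a.2, a.1) < toLex (b.2, b.1))) := by
    funext a b; exact lex_key_eq a b
  rw [h]

-- setdefault-then-increment is insert of getD+1
lemma step_eq (d : PySem.Dict Int Int) (num : Int) :
    (PySem.Dict.setdefault d num 0).insert num
        ((PySem.Dict.setdefault d num 0).getD num 0 + 1)
      = d.insert num (d.getD num 0 + 1) := by
  rw [PySem.Dict.getD_setdefault_self]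
  by_cases h : d.contains num = true
  · rw [PySem.Dict.setdefault_of_contains d _ h]
  · rw [PySem.Dict.setdefault_of_not_contains d _ (by simpa using h),
      PySem.Dict.insert_insert_self]

lemma not_mem_dropWhile (v : Int) :
    ∀ (l : List Int), (∀ x ∈ l, v ≤ x) → l.Pairwise (· ≤ ·) →
      v ∉ l.dropWhile (fun x => x == v)
  | [], _, _ => by simp
  | a :: t, hge, hpw => by
    by_cases h : (a == v) = true
    · rw [List.dropWhile_cons, if_pos h]
      exact not_mem_dropWhile v t (fun x hx => hge x (List.mem_cons_of_mem _ hx))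
        hpw.tail
    · rw [List.dropWhile_cons, if_neg h]
      intro hmem
      rcases List.mem_cons.mp hmem with rfl | hmem
      · simp at h
      · have h1 : a ≤ v := (List.pairwise_cons.mp hpw).1 v hmem
        have h2 : v ≤ a := hge a (List.mem_cons_self)
        have : a = v := le_antisymm h1 h2
        simp [this] at h

lemma pvRuns_cons (v : Int) (t : List Int) :
    pvRuns (v :: t)
      = (v, (1 + (t.takeWhile (fun x => x == v)).length : Int))
          :: pvRuns (t.dropWhile (fun x => x == v)) := by
  rw [pvRuns]

-- on a sorted list, pvRuns produces exactly the (value, multiplicity) pairs, with strictly increasing values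
lemma pvRuns_char : ∀ (n : Nat) (l : List Int), l.length ≤ n → l.Pairwise (· ≤ ·) →
    (∀ p : Int × Int, p ∈ pvRuns l ↔ p.1 ∈ l ∧ p.2 = (l.count p.1 : Int)) ∧
    (pvRuns l).Pairwise (fun a b => a.1 < b.1)
  | 0, l, hlen, _ => by
    have : l = [] := List.eq_nil_of_length_eq_zero (Nat.le_zero.mp hlen)
    subst this
    simp [pvRuns]
  | n + 1, [], _, _ => by simp [pvRuns]
  | n + 1, v :: t, hlen, hpw => by
    set s := t.takeWhile (fun x => x == v) with hsdef
    set d := t.dropWhile (fun x => x == v) with hddef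
    have hts : t = s ++ d := (List.takeWhile_append_dropWhile).symm
    have hs : ∀ x ∈ s, x = v := by
      intro x hx
      have := List.mem_takeWhile_imp hx
      simpa using this
    have hged : ∀ x ∈ t, v ≤ x := (List.pairwise_cons.mp hpw).1
    have hnd : v ∉ d := not_mem_dropWhile v t hged hpw.tail
    have hdsub : ∀ x ∈ d, x ∈ t := by
      intro x hx; rw [hts]; exact List.mem_append_right _ hx
    have hlt : ∀ x ∈ d, v < x := fun x hx =>
      lt_of_le_of_ne (hged x (hdsub x hx)) (fun e => hnd (e ▸ hx))
    have hdpw : d.Pairwise (· ≤ ·) :=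
      (hpw.tail).sublist (List.dropWhile_sublist _)
    have hdlen : d.length ≤ n := by
      have := congrArg List.length hts
      simp only [List.length_append] at this
      simp only [List.length_cons] at hlen
      omega
    obtain ⟨ihmem, ihpw⟩ := pvRuns_char n d hdlen hdpw
    have hcv : ((v :: t).count v : Int) = 1 + (s.length : Int) := by
      have h1 : s.count v = s.length :=
        List.count_eq_length.mpr (fun b hb => ((hs b hb).symm ▸ rfl))
      have h2 : d.count v = 0 := List.count_eq_zero.mpr hnd
      rw [hts]
      simp [List.count_append, h1, h2]
      ring
    have hcx : ∀ x, x ≠ v → ((v :: t).count x : Int) = (d.count x : Int) := by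
      intro x hx
      have h1 : s.count x = 0 :=
        List.count_eq_zero.mpr (fun hm => hx (hs x hm))
      rw [hts]
      simp [List.count_cons, List.count_append, h1]
      exact fun e => hx e.symm
    constructor
    · intro p
      rw [pvRuns_cons, ← hsdef, ← hddef]
      constructor
      · intro hp
        rcases List.mem_cons.mp hp with rfl | hp
        · refine ⟨List.mem_cons_self, ?_⟩
          simp only
          rw [hcv]
        · obtain ⟨hmem, hcnt⟩ := (ihmem p).mp hp
          have hne : p.1 ≠ v := fun e => hnd (e ▸ hmem)
          exact ⟨List.mem_cons_of_mem _ (hdsub _ hmem), by rw [hcx p.1 hne]; exact hcnt⟩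
      · rintro ⟨hmem, hcnt⟩
        by_cases hx : p.1 = v
        · have hp2 : p.2 = (1 + (s.length : Int)) := by rw [hcnt, hx, hcv]
          have hpe : p = (v, (1 + (s.length : Int))) := by
            obtain ⟨p1, p2⟩ := p
            simp only at hx hp2
            rw [hx, hp2]
          rw [hpe]
          exact List.mem_cons_self
        · right
          apply (ihmem p).mpr
          have hmt : p.1 ∈ t := by
            rcases List.mem_cons.mp hmem with h | h
            · exact absurd h hx
            · exact h
          have hmd : p.1 ∈ d := by
            rw [hts] at hmt
            rcases List.mem_append.mp hmt with h | h
            · exact absurd (hs _ h) hx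
            · exact h
          exact ⟨hmd, by rw [← hcx p.1 hx]; exact hcnt⟩
    · rw [pvRuns_cons, ← hsdef, ← hddef]
      refine List.pairwise_cons.mpr ⟨?_, ihpw⟩
      intro q hq
      exact hlt q.1 ((ihmem q).mp hq).1

-- A's dict-building loop over arr is Counter of the nonzero values
lemma dict_fold_eq_counter (arr : List Int) :
    arr.foldl (fun d num =>
      if num == 0 then d
      else
        let d := PySem.Dict.setdefault d num (0 : Int)
        d.insert num (d.getD num 0 + 1)) PySem.Dict.empty
      = PySem.Dict.counter (arr.filter (fun v => !(v == 0))) := by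
  have h1 : (fun (d : PySem.Dict Int Int) num =>
      if num == 0 then d
      else
        let d := PySem.Dict.setdefault d num (0 : Int)
        d.insert num (d.getD num 0 + 1))
      = (fun d num => if (!(num == 0)) = true
          then d.insert num (d.getD num 0 + 1) else d) := by
    funext d num
    by_cases h : (num == 0) = true <;> simp [h, step_eq]
  rw [h1, PySem.List.foldl_if_eq_foldl_filter,
    PySem.Dict.foldl_insert_getD_add_one_eq_counter]

-- B's run-length pairs of the sorted values are a permutation of A's counter items
lemma pairs_perm (xs : List Int) :
    (pvRuns (PySem.List.sorted xs (fun x => x))).Perm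
      ((PySem.Set.ofList xs).map (fun k => (k, (xs.count k : Int)))) := by
  have hperm : (PySem.List.sorted xs (fun x => x)).Perm xs :=
    PySem.List.sorted_perm xs _ false
  obtain ⟨hmem, hpw⟩ := pvRuns_char (PySem.List.sorted xs (fun x => x)).length
    (PySem.List.sorted xs (fun x => x)) le_rfl (PySem.List.sorted_pairwise xs _)
  have hnodupB : (pvRuns (PySem.List.sorted xs (fun x => x))).Nodup :=
    hpw.imp (fun h e => by rw [e] at h; exact lt_irrefl _ h)
  have hnodupA : ((PySem.Set.ofList xs).map (fun k => (k, (xs.count k : Int)))).Nodup :=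
    (PySem.Set.nodup_ofList xs).map (fun a b h => congrArg Prod.fst h)
  refine (List.perm_ext_iff_of_nodup hnodupB hnodupA).mpr (fun p => ?_)
  rw [hmem p, hperm.mem_iff, hperm.count_eq]
  constructor
  · rintro ⟨h1, h2⟩
    exact List.mem_map.mpr ⟨p.1, (PySem.Set.mem_ofList _ _).mpr h1,
      by obtain ⟨p1, p2⟩ := p; simp only at h1 h2 ⊢; rw [h2]⟩
  · intro h
    obtain ⟨k, hk, he⟩ := List.mem_map.mp h
    have hk' : k ∈ xs := (PySem.Set.mem_ofList _ _).mp hk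
    obtain ⟨p1, p2⟩ := p
    simp only [Prod.mk.injEq] at he
    obtain ⟨rfl, rfl⟩ := he
    exact ⟨hk', rfl⟩

lemma count_eq (arr : List Int) : count arr = count_alt arr := by
  simp only [count, count_alt]
  rw [dict_fold_eq_counter, PySem.Dict.items_counter,
    sorted2_eq_sorted_lex, sorted2_eq_sorted_lex]
  have hinj : Function.Injective (fun p : Int × Int => toLex (p.2, p.1)) := by
    intro a b h
    have h' := congrArg ofLex h
    simp only [ofLex_toLex] at h'
    obtain ⟨a1, a2⟩ := a; obtain ⟨b1, b2⟩ := b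
    simp only [Prod.mk.injEq] at h' ⊢
    exact ⟨h'.2, h'.1⟩
  rw [PySem.List.sorted_eq_sorted_of_perm _ _ _ hinj (pairs_perm _).symm]
  have hfl : (fun (r : List Int) (p : Int × Int) => (r ++ [p.1]) ++ [p.2])
      = fun r p => r ++ [p.1, p.2] := by
    funext r p; simp
  rw [hfl]

-- ===== VERDICT (by name: the statement is the Claim_ definition above) =====
theorem count_spec : Claim_equal_count := fun arr _ => count_eq arr
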